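-- pv_equiv track=rewrite | github.com/JesperDramsch/advent-of-code | 2020/day16.py | validate_v1
-- ===== SOURCE A (Python) =====
-- def validate_rule(rule, num):
--     et = rule[0]
--     to = rule[1]
--     return (et[0] <= num <= et[1]) or (to[0] <= num <= to[1])
--
-- def validate_v1(rules, neighbours):
--     not_ok = []
--     for n in neighbours:
--         validated = False
--         for _, v in rules.items():
--             if validate_rule(v, n):
--                 validated = True
--                 break
--         if not validated:
--             not_ok.append(n)
--     return not_ok
-- ===== SOURCE B (Python) =====
-- def validate_v1(rules, neighbours):
--     # collect non-empty intervals, sort by start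
--     ivs = sorted((iv for pair in rules.values() for iv in pair if iv[0] <= iv[1]),
--                  key=lambda iv: iv[0])
--     # merge overlapping intervals into a sorted, pairwise-disjoint list
--     merged = []
--     if ivs:
--         cl, ch = ivs[0]
--         for l, h in ivs[1:]:
--             if l <= ch:
--                 if h > ch:
--                     ch = h
--             else:
--                 merged.append((cl, ch))
--                 cl, ch = l, h
--         merged.append((cl, ch))
--     starts = [iv[0] for iv in merged]
--
--     def covered(n):
--         # rightmost index with starts[index] <= n, by binary search
--         lo, hi = 0, len(starts)
--         while lo < hi:
--             mid = (lo + hi) // 2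
--             if starts[mid] <= n:
--                 lo = mid + 1
--             else:
--                 hi = mid
--         return lo > 0 and n <= merged[lo - 1][1]
--
--     return [n for n in neighbours if not covered(n)]
-- ===== Notes on version B (the rewrite author's own statement) =====
-- stated objective: faster
-- what changed: Instead of scanning every rule's two intervals for each neighbour, B collects the non-empty intervals once, sorts them by start, merges overlaps into a disjoint sorted list, and decides each neighbour by a hand-written binary search over the merged starts.
import Mathlib
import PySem

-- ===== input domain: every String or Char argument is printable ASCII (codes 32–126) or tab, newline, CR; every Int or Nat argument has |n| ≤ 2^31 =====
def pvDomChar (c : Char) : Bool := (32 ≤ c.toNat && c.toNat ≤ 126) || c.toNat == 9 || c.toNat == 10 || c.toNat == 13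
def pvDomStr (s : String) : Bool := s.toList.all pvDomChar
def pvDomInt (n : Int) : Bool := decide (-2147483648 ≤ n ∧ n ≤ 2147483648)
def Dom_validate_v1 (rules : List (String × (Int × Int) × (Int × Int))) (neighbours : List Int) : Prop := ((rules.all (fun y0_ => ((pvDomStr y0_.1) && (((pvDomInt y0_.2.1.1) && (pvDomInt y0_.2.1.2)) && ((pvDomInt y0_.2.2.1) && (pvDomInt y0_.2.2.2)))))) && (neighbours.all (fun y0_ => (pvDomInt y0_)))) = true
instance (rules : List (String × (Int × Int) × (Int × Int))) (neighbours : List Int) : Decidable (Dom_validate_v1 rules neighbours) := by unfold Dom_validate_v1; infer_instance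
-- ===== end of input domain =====

-- B merges the rule intervals once (sort by start, merge overlaps) and binary-searches each
-- neighbour in the merged list, instead of A's scan of every rule per neighbour (objective: faster).

-- ===== PORT A =====
def validate_rule (rule : (Int × Int) × (Int × Int)) (num : Int) : Bool :=
  decide ((rule.1.1 ≤ num ∧ num ≤ rule.1.2) ∨ (rule.2.1 ≤ num ∧ num ≤ rule.2.2))

-- the inner 'for _, v in rules.items(): … break' loop with its 'validated' flag
def anyRuleA (rules : List (String × (Int × Int) × (Int × Int))) (n : Int) : Bool :=
  match rules with
  | [] => false
  | (_, v) :: rest => if validate_rule v n then true else anyRuleA rest n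

def validate_v1 (rules : List (String × (Int × Int) × (Int × Int))) (neighbours : List Int) : List Int :=
  neighbours.foldl (fun not_ok n => if anyRuleA rules n then not_ok else not_ok ++ [n]) []

-- ===== PORT B =====
-- the merge loop of Source B: (cl, ch) is the open interval, acc the finished ones
def mergeGo : List (Int × Int) → Int → Int → List (Int × Int) → List (Int × Int)
  | [], cl, ch, acc => acc ++ [(cl, ch)]
  | (l, h) :: rest, cl, ch, acc =>
      if l ≤ ch then mergeGo rest cl (if h > ch then h else ch) acc
      else mergeGo rest l h (acc ++ [(cl, ch)])

-- the hand-written 'while lo < hi' binary search of Source B; the loop runs at most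
-- hi - lo times (the gap shrinks every iteration), which bounds the structural fuel
def bsearchGo (starts : List Int) (n : Int) : Nat → Nat → Nat → Nat
  | 0, lo, _ => lo
  | fuel + 1, lo, hi =>
    if lo < hi then
      let mid := (lo + hi) / 2
      if starts.getD mid 0 ≤ n then bsearchGo starts n fuel (mid + 1) hi
      else bsearchGo starts n fuel lo mid
    else lo

def bsearchB (starts : List Int) (n : Int) (lo hi : Nat) : Nat :=
  bsearchGo starts n (hi - lo) lo hi

def coveredB (merged : List (Int × Int)) (starts : List Int) (n : Int) : Bool :=
  let lo := bsearchB starts n 0 starts.length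
  decide (0 < lo) && decide (n ≤ (merged.getD (lo - 1) (0, 0)).2)

def validate_v1_alt (rules : List (String × (Int × Int) × (Int × Int))) (neighbours : List Int) : List Int :=
  let ivs := PySem.List.sorted
    (((rules.map (fun p => p.2)).flatMap (fun v => [v.1, v.2])).filter (fun iv => decide (iv.1 ≤ iv.2)))
    (fun iv => iv.1) false
  let merged := match ivs with
    | [] => []
    | (cl, ch) :: rest => mergeGo rest cl ch []
  let starts := merged.map (fun iv => iv.1)
  neighbours.filter (fun n => !coveredB merged starts n)

-- ===== PRECONDITION & SPEC =====
def Spec_validate_v1 (rules : List (String × (Int × Int) × (Int × Int))) (neighbours : List Int) (out : List Int) : Prop := out = validate_v1_alt rules neighbours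
instance (rules : List (String × (Int × Int) × (Int × Int))) (neighbours : List Int) (out : List Int) : Decidable (Spec_validate_v1 rules neighbours out) := by unfold Spec_validate_v1; infer_instance

-- ===== CLAIM (what is proved, stated in full; the proofs are below) =====
def Claim_equal_validate_v1 : Prop := ∀ (rules : List (String × (Int × Int) × (Int × Int))) (neighbours : List Int), Dom_validate_v1 rules neighbours → Spec_validate_v1 rules neighbours (validate_v1 rules neighbours)

-- ===== LEMMAS AND PROOFS =====

-- A's foldl builds exactly the filter of the non-validated neighbours
theorem validate_v1_eq_filter (rules : List (String × (Int × Int) × (Int × Int))) (ns : List Int) :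
    validate_v1 rules ns = ns.filter (fun n => !anyRuleA rules n) := by
  have aux : ∀ (l : List Int) (acc : List Int),
      l.foldl (fun a n => if anyRuleA rules n then a else a ++ [n]) acc
        = acc ++ l.filter (fun n => !anyRuleA rules n) := by
    intro l
    induction l with
    | nil => intro acc; simp
    | cons x xs ih =>
      intro acc
      simp only [List.foldl_cons, List.filter_cons]
      by_cases h : anyRuleA rules x
      · simp [h, ih]
      · simp [h, ih, List.append_assoc]
  simpa using aux ns []

theorem anyRuleA_iff (rules : List (String × (Int × Int) × (Int × Int))) (n : Int) :
    anyRuleA rules n = true ↔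
      ∃ iv ∈ (rules.map (fun p => p.2)).flatMap (fun v => [v.1, v.2]), iv.1 ≤ n ∧ n ≤ iv.2 := by
  induction rules with
  | nil => simp [anyRuleA]
  | cons r rest ih =>
    obtain ⟨k, v⟩ := r
    simp only [anyRuleA, validate_rule, List.map_cons, List.flatMap_cons, List.mem_append]
    split_ifs with h
    · simp only [true_iff]
      rcases of_decide_eq_true h with h' | h'
      · exact ⟨v.1, by simp, h'⟩
      · exact ⟨v.2, by simp, h'⟩
    · rw [ih]
      constructor
      · rintro ⟨iv, hm, hc⟩; exact ⟨iv, Or.inr hm, hc⟩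
      · rintro ⟨iv, hm | hm, hc⟩
        · exfalso; apply h
          simp only [List.mem_cons, List.not_mem_nil, or_false] at hm
          rcases hm with rfl | rfl
          · exact decide_eq_true (Or.inl hc)
          · exact decide_eq_true (Or.inr hc)
        · exact ⟨iv, hm, hc⟩

-- merge-loop invariant: the result is pairwise-disjoint, each interval is non-empty,
-- and it covers exactly what acc, the open interval (cl,ch) and the remaining input cover
theorem mergeGo_spec : ∀ (rest : List (Int × Int)) (cl ch : Int) (acc : List (Int × Int)),
    cl ≤ ch →
    rest.Pairwise (fun a b => a.1 ≤ b.1) →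
    (∀ iv ∈ rest, cl ≤ iv.1 ∧ iv.1 ≤ iv.2) →
    acc.Pairwise (fun a b => a.2 < b.1) →
    (∀ iv ∈ acc, iv.1 ≤ iv.2 ∧ iv.2 < cl) →
    (mergeGo rest cl ch acc).Pairwise (fun a b => a.2 < b.1) ∧
    (∀ iv ∈ mergeGo rest cl ch acc, iv.1 ≤ iv.2) ∧
    (∀ n : Int, (∃ iv ∈ mergeGo rest cl ch acc, iv.1 ≤ n ∧ n ≤ iv.2) ↔
        ((∃ iv ∈ acc, iv.1 ≤ n ∧ n ≤ iv.2) ∨ (cl ≤ n ∧ n ≤ ch) ∨ (∃ iv ∈ rest, iv.1 ≤ n ∧ n ≤ iv.2))) := by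
  intro rest
  induction rest with
  | nil =>
    intro cl ch acc hcl _ _ hpacc hacc
    refine ⟨?_, ?_, ?_⟩
    · simp only [mergeGo]
      rw [List.pairwise_append]
      exact ⟨hpacc, List.pairwise_singleton _ _, by
        intro a ha b hb; simp at hb; subst hb; exact (hacc a ha).2⟩
    · intro iv hm
      simp only [mergeGo] at hm
      rcases List.mem_append.1 hm with h | h
      · exact (hacc iv h).1
      · simp at h; subst h; exact hcl
    · intro n
      simp only [mergeGo, List.mem_append, List.mem_singleton]
      constructor
      · rintro ⟨iv, h | h, hc⟩
        · exact Or.inl ⟨iv, h, hc⟩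
        · subst h; exact Or.inr (Or.inl hc)
      · rintro (⟨iv, h, hc⟩ | hc | ⟨iv, h, _⟩)
        · exact ⟨iv, Or.inl h, hc⟩
        · exact ⟨(cl, ch), Or.inr rfl, hc⟩
        · exact absurd h (List.not_mem_nil)
  | cons p rest ih =>
    obtain ⟨l, h⟩ := p
    intro cl ch acc hcl hsorted hrest hpacc hacc
    have hl : cl ≤ l ∧ l ≤ h := hrest (l, h) (List.mem_cons_self)
    have hsorted' : rest.Pairwise (fun a b => a.1 ≤ b.1) := hsorted.tail
    have hhead : ∀ iv ∈ rest, l ≤ iv.1 := by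
      intro iv hm
      exact (List.pairwise_cons.1 hsorted).1 iv hm
    by_cases hb : l ≤ ch
    · have := ih cl (if h > ch then h else ch) acc (by split_ifs with hh <;> omega)
        hsorted'
        (fun iv hm => ⟨(hrest iv (List.mem_cons_of_mem _ hm)).1, (hrest iv (List.mem_cons_of_mem _ hm)).2⟩)
        hpacc hacc
      refine ⟨?_, ?_, ?_⟩
      · simpa [mergeGo, hb] using this.1
      · simpa [mergeGo, hb] using this.2.1
      · intro n
        have h3 := this.2.2 n
        simp only [mergeGo, if_pos hb]
        rw [h3]
        constructor
        · rintro (hA | hC | hR)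
          · exact Or.inl hA
          · by_cases hn : n ≤ ch
            · exact Or.inr (Or.inl ⟨hC.1, hn⟩)
            · refine Or.inr (Or.inr ⟨(l, h), List.mem_cons_self, ?_, ?_⟩) <;>
                · simp at hC ⊢; split_ifs at hC with hh <;> omega
          · exact Or.inr (Or.inr ⟨hR.choose, List.mem_cons_of_mem _ hR.choose_spec.1, hR.choose_spec.2⟩)
        · rintro (hA | hC | ⟨iv, hm, hc⟩)
          · exact Or.inl hA
          · refine Or.inr (Or.inl ⟨hC.1, ?_⟩); split_ifs with hh <;> omega
          · rcases List.mem_cons.1 hm with rfl | hm'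
            · refine Or.inr (Or.inl ⟨by omega, ?_⟩)
              simp at hc; split_ifs with hh <;> omega
            · exact Or.inr (Or.inr ⟨iv, hm', hc⟩)
    · have hlch : ch < l := by omega
      have := ih l h (acc ++ [(cl, ch)]) hl.2 hsorted'
        (fun iv hm => ⟨hhead iv hm, (hrest iv (List.mem_cons_of_mem _ hm)).2⟩)
        (by
          rw [List.pairwise_append]
          exact ⟨hpacc, List.pairwise_singleton _ _, by
            intro a ha b hb; simp at hb; subst hb; exact (hacc a ha).2⟩)
        (by
          intro iv hm
          rcases List.mem_append.1 hm with hm' | hm'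
          · exact ⟨(hacc iv hm').1, by have := (hacc iv hm').2; omega⟩
          · simp at hm'; subst hm'; exact ⟨hcl, hlch⟩)
      refine ⟨?_, ?_, ?_⟩
      · simpa [mergeGo, hb] using this.1
      · simpa [mergeGo, hb] using this.2.1
      · intro n
        have h3 := this.2.2 n
        simp only [mergeGo, if_neg hb]
        rw [h3]
        constructor
        · rintro (hA | hC | hR)
          · rcases hA with ⟨iv, hm, hc⟩
            rcases List.mem_append.1 hm with hm' | hm'
            · exact Or.inl ⟨iv, hm', hc⟩
            · simp at hm'; subst hm'; exact Or.inr (Or.inl hc)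
          · exact Or.inr (Or.inr ⟨(l, h), List.mem_cons_self, hC⟩)
          · exact Or.inr (Or.inr ⟨hR.choose, List.mem_cons_of_mem _ hR.choose_spec.1, hR.choose_spec.2⟩)
        · rintro (⟨iv, hm, hc⟩ | hC | ⟨iv, hm, hc⟩)
          · exact Or.inl ⟨iv, List.mem_append.2 (Or.inl hm), hc⟩
          · exact Or.inl ⟨(cl, ch), List.mem_append.2 (Or.inr (List.mem_singleton.2 rfl)), hC⟩
          · rcases List.mem_cons.1 hm with rfl | hm'
            · exact Or.inr (Or.inl hc)
            · exact Or.inr (Or.inr ⟨iv, hm', hc⟩)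

-- binary-search invariant: on a nondecreasing list, the result k separates
-- the indices with starts[i] ≤ n (below k) from the rest
theorem bsearchGo_inv (starts : List Int) (n : Int)
    (hs : starts.Pairwise (· ≤ ·)) :
    ∀ (fuel lo hi : Nat), hi - lo ≤ fuel → lo ≤ hi → hi ≤ starts.length →
    (∀ i, i < lo → starts.getD i 0 ≤ n) →
    (∀ i, hi ≤ i → i < starts.length → ¬ starts.getD i 0 ≤ n) →
    lo ≤ bsearchGo starts n fuel lo hi ∧ bsearchGo starts n fuel lo hi ≤ hi ∧
    (∀ i, i < bsearchGo starts n fuel lo hi → starts.getD i 0 ≤ n) ∧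
    (∀ i, bsearchGo starts n fuel lo hi ≤ i → i < starts.length → ¬ starts.getD i 0 ≤ n) := by
  have hmono : ∀ i j, i ≤ j → j < starts.length → starts.getD i 0 ≤ starts.getD j 0 := by
    intro i j hij hj
    rcases Nat.eq_or_lt_of_le hij with rfl | hlt
    · exact le_refl _
    · have := (List.pairwise_iff_getElem.1 hs) i j (by omega) hj hlt
      rw [List.getD_eq_getElem _ _ (by omega), List.getD_eq_getElem _ _ hj]
      exact this
  intro fuel
  induction fuel with
  | zero =>
    intro lo hi hfuel hlo hhi h3 h4
    have : lo = hi := by omega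
    subst this
    simp only [bsearchGo]
    exact ⟨le_refl _, le_refl _, h3, fun i hi' => h4 i (by omega)⟩
  | succ fuel ih =>
    intro lo hi hfuel hlo hhi h3 h4
    by_cases hlt : lo < hi
    · have heq : bsearchGo starts n (fuel + 1) lo hi
          = if starts.getD ((lo + hi) / 2) 0 ≤ n then bsearchGo starts n fuel ((lo + hi) / 2 + 1) hi
            else bsearchGo starts n fuel lo ((lo + hi) / 2) := by
        simp [bsearchGo, hlt]
      set mid := (lo + hi) / 2 with hmid
      by_cases hle : starts.getD mid 0 ≤ n
      · rw [heq, if_pos hle]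
        obtain ⟨a, b, c, d⟩ := ih (mid + 1) hi (by omega) (by omega) hhi
          (by
            intro i hi'
            by_cases hc : i < lo
            · exact h3 i hc
            · exact le_trans (hmono i mid (by omega) (by omega)) hle)
          h4
        exact ⟨by omega, b, c, d⟩
      · rw [heq, if_neg hle]
        obtain ⟨a, b, c, d⟩ := ih lo mid (by omega) (by omega) (by omega) h3
          (by
            intro i hi' hilen hc
            exact hle (le_trans (hmono mid i hi' hilen) hc))
        exact ⟨a, by omega, c, d⟩
    · simp only [bsearchGo, if_neg hlt]
      exact ⟨le_refl _, by omega, h3, fun i hi' => h4 i (by omega)⟩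

theorem bsearchB_inv (starts : List Int) (n : Int)
    (hs : starts.Pairwise (· ≤ ·)) :
    ∀ (lo hi : Nat), lo ≤ hi → hi ≤ starts.length →
    (∀ i, i < lo → starts.getD i 0 ≤ n) →
    (∀ i, hi ≤ i → i < starts.length → ¬ starts.getD i 0 ≤ n) →
    lo ≤ bsearchB starts n lo hi ∧ bsearchB starts n lo hi ≤ hi ∧
    (∀ i, i < bsearchB starts n lo hi → starts.getD i 0 ≤ n) ∧
    (∀ i, bsearchB starts n lo hi ≤ i → i < starts.length → ¬ starts.getD i 0 ≤ n) := by
  intro lo hi hlo hhi h3 h4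
  exact bsearchGo_inv starts n hs (hi - lo) lo hi (le_refl _) hlo hhi h3 h4

theorem coveredB_iff (merged : List (Int × Int))
    (hdisj : merged.Pairwise (fun a b => a.2 < b.1))
    (hne : ∀ iv ∈ merged, iv.1 ≤ iv.2) (n : Int) :
    coveredB merged (merged.map (fun iv => iv.1)) n = true ↔
      ∃ iv ∈ merged, iv.1 ≤ n ∧ n ≤ iv.2 := by
  set starts := merged.map (fun iv => iv.1) with hst
  have hlen : starts.length = merged.length := List.length_map ..
  have hgetd : ∀ (i : Nat) (hi : i < merged.length), starts.getD i 0 = (merged[i]'hi).1 := by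
    intro i hi
    rw [List.getD_eq_getElem _ _ (by rw [hlen]; exact hi)]
    simp [hst]
  have hs : starts.Pairwise (· ≤ ·) := by
    rw [hst, List.pairwise_map]
    refine hdisj.imp_of_mem ?_
    intro a b ha hb hab
    have := hne a ha
    omega
  obtain ⟨hk0, hkhi, hkP, hkN⟩ := bsearchB_inv starts n hs 0 starts.length
    (by omega) (le_refl _) (by omega) (by omega)
  set k := bsearchB starts n 0 starts.length with hk
  unfold coveredB
  rw [← hk]
  simp only [Bool.and_eq_true, decide_eq_true_iff]
  constructor
  · rintro ⟨hpos, hle⟩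
    have hk1 : k - 1 < merged.length := by omega
    refine ⟨merged[k-1]'hk1, List.getElem_mem hk1, ?_, ?_⟩
    · have := hkP (k - 1) (by omega)
      rwa [hgetd _ hk1] at this
    · rwa [List.getD_eq_getElem _ _ hk1] at hle
  · rintro ⟨iv, hm, h1, h2⟩
    obtain ⟨i, hi, rfl⟩ := List.mem_iff_getElem.1 hm
    have hPi : starts.getD i 0 ≤ n := by rw [hgetd _ hi]; exact h1
    have hik : i < k := by
      by_contra hc
      exact hkN i (by omega) (by omega) hPi
    have hpos : 0 < k := by omega
    refine ⟨hpos, ?_⟩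
    have hk1 : k - 1 < merged.length := by omega
    rw [List.getD_eq_getElem _ _ hk1]
    rcases Nat.lt_trichotomy i (k - 1) with hlt | heq | hgt
    · exfalso
      have hd := (List.pairwise_iff_getElem.1 hdisj) i (k - 1) hi hk1 hlt
      have := hkP (k - 1) (by omega)
      rw [hgetd _ hk1] at this
      omega
    · subst heq; exact h2
    · omega

-- B's covered test agrees with A's rule scan, for the merged list built from the rules
-- proof-side name for the merged interval list validate_v1_alt builds
def mergedOf (rules : List (String × (Int × Int) × (Int × Int))) : List (Int × Int) :=
  match PySem.List.sorted
      (((rules.map (fun p => p.2)).flatMap (fun v => [v.1, v.2])).filter (fun iv => decide (iv.1 ≤ iv.2)))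
      (fun iv => iv.1) false with
  | [] => []
  | (cl, ch) :: rest => mergeGo rest cl ch []

theorem covered_eq_anyRule (rules : List (String × (Int × Int) × (Int × Int))) (n : Int) :
    coveredB (mergedOf rules) ((mergedOf rules).map (fun iv => iv.1)) n = anyRuleA rules n := by
  unfold mergedOf
  set all := (rules.map (fun p => p.2)).flatMap (fun v => [v.1, v.2]) with hall
  set filt := all.filter (fun iv => decide (iv.1 ≤ iv.2)) with hfilt
  set ivs := PySem.List.sorted filt (fun iv => iv.1) false with hivs
  have hmemivs : ∀ iv : Int × Int, iv ∈ ivs ↔ iv ∈ filt := fun iv => PySem.List.mem_sorted _ _ _ _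
  have hsivs : ivs.Pairwise (fun a b => a.1 ≤ b.1) := PySem.List.sorted_pairwise _ _
  have hneivs : ∀ iv ∈ ivs, iv.1 ≤ iv.2 := by
    intro iv hm
    have := (hmemivs iv).1 hm
    simp [hfilt, List.mem_filter] at this
    exact this.2
  have hcovall : ∀ m : Int, (∃ iv ∈ ivs, iv.1 ≤ m ∧ m ≤ iv.2) ↔ (∃ iv ∈ all, iv.1 ≤ m ∧ m ≤ iv.2) := by
    intro m
    constructor
    · rintro ⟨iv, hm, hc⟩
      have := (hmemivs iv).1 hm
      rw [hfilt, List.mem_filter] at this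
      exact ⟨iv, this.1, hc⟩
    · rintro ⟨iv, hm, hc⟩
      refine ⟨iv, (hmemivs iv).2 ?_, hc⟩
      rw [hfilt, List.mem_filter]
      exact ⟨hm, by simp; omega⟩
  match hm : ivs with
  | [] =>
    have : filt = [] := by rw [hivs] at hm; exact (PySem.List.sorted_eq_nil_iff _ _ _).1 hm
    have hnone : ∀ m : Int, ¬ ∃ iv ∈ all, iv.1 ≤ m ∧ m ≤ iv.2 := by
      intro m hex
      have := (hcovall m).2 hex
      rw [hm] at this
      simp at this
    have : anyRuleA rules n = false := by
      rw [← Bool.not_eq_true, anyRuleA_iff]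
      exact hnone n
    rw [this]
    simp [coveredB, bsearchB, bsearchGo]
  | (cl, ch) :: rest =>
    have h0 : (cl, ch) ∈ ivs := by rw [hm]; exact List.mem_cons_self
    have hclch : cl ≤ ch := hneivs _ h0
    rw [hm] at hsivs
    obtain ⟨hdisj, hne, hcov⟩ := mergeGo_spec rest cl ch [] hclch hsivs.tail
      (by
        intro iv hmm
        refine ⟨(List.pairwise_cons.1 hsivs).1 iv hmm, hneivs iv ?_⟩
        rw [hm]; exact List.mem_cons_of_mem _ hmm)
      (List.Pairwise.nil) (by simp)
    show coveredB (mergeGo rest cl ch []) ((mergeGo rest cl ch []).map (fun iv => iv.1)) n = anyRuleA rules n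
    rw [Bool.eq_iff_iff, coveredB_iff _ hdisj hne n, hcov n, anyRuleA_iff, ← hall, ← hcovall n, hm]
    simp only [List.not_mem_nil, false_and, exists_false, false_or, List.mem_cons]
    constructor
    · rintro (hc | ⟨iv, hmm, hc⟩)
      · exact ⟨(cl, ch), Or.inl rfl, hc⟩
      · exact ⟨iv, Or.inr hmm, hc⟩
    · rintro ⟨iv, rfl | hmm, hc⟩
      · exact Or.inl hc
      · exact Or.inr ⟨iv, hmm, hc⟩

theorem validate_v1_spec : Claim_equal_validate_v1 := by
  intro rules ns _
  show validate_v1 rules ns = validate_v1_alt rules ns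
  rw [validate_v1_eq_filter]
  show ns.filter (fun n => !anyRuleA rules n)
      = ns.filter (fun n => !coveredB (mergedOf rules) ((mergedOf rules).map (fun iv => iv.1)) n)
  refine List.filter_congr ?_
  intro n _
  rw [covered_eq_anyRule rules n]
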